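-- pv_equiv track=rewrite | github.com/jbkinney/poolparty-statetracker | poolparty/legacy/v0/legacy_poolparty/orf_pool.py | _build_mutation_lookup_static
-- ===== SOURCE A (Python) =====
-- def _build_mutation_lookup_static(aa_to_codon: dict, codon_to_aa: dict,
--                                  codon_to_syn: dict, stops: list, codons: list) -> dict:
--     """Build mutation lookup tables (static version for caching).
--
--     Args:
--         aa_to_codon: Dict mapping AA -> list of codons
--         codon_to_aa: Dict mapping codon -> AA
--         codon_to_syn: Dict mapping codon -> list of synonymous codons
--         stops: List of stop codons
--         codons: List of all codons
--
--     Returns: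
--         Dict mapping mutation_type -> codon -> list of mutations
--
--     Mutation types:
--     - any_codon: All 63 other codons
--     - nonsynonymous_first: First codon of each different amino acid (includes stop)
--     - nonsynonymous_random: All codons encoding different amino acids (includes stop)
--     - missense_only_first: First codon of each different AA, excluding stop
--     - missense_only_random: All codons for different AAs, excluding stop
--     - synonymous: Synonymous codons
--     - nonsense: Stop codons for non-stop codons, empty for stops
--     """
--     lookup = {}
--
--     # 1. any_codon: all other codons
--     lookup['any_codon'] = {
--         codon: [c for c in codons if c != codon]
--         for codon in codons
--     }
--
--     # 2. nonsynonymous_first: different AA/stop, first codon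
--     lookup['nonsynonymous_first'] = {}
--     for codon in codons:
--         current_aa = codon_to_aa[codon]
--         lookup['nonsynonymous_first'][codon] = [
--             aa_to_codon[aa][0]
--             for aa in aa_to_codon.keys()
--             if aa != current_aa
--         ]
--
--     # 3. nonsynonymous_random: different AA/stop, all codons
--     lookup['nonsynonymous_random'] = {}
--     for codon in codons:
--         current_aa = codon_to_aa[codon]
--         mutations = []
--         for aa, codon_list in aa_to_codon.items():
--             if aa != current_aa:
--                 mutations.extend(codon_list)
--         lookup['nonsynonymous_random'][codon] = mutations
--
--     # 4. missense_only_first: different AA, first codon, NO stop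
--     lookup['missense_only_first'] = {}
--     for codon in codons:
--         current_aa = codon_to_aa[codon]
--         lookup['missense_only_first'][codon] = [
--             aa_to_codon[aa][0]
--             for aa in aa_to_codon.keys()
--             if aa != current_aa and aa != '*'
--         ]
--
--     # 5. missense_only_random: different AA, all codons, NO stop
--     lookup['missense_only_random'] = {}
--     for codon in codons:
--         current_aa = codon_to_aa[codon]
--         mutations = []
--         for aa, codon_list in aa_to_codon.items():
--             if aa != current_aa and aa != '*':
--                 mutations.extend(codon_list)
--         lookup['missense_only_random'][codon] = mutations
--
--     # 6. synonymous: synonymous codons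
--     lookup['synonymous'] = codon_to_syn
--
--     # 7. nonsense: stop codons
--     lookup['nonsense'] = {
--         codon: [] if codon in stops else stops.copy()
--         for codon in codons
--     }
--
--     return lookup
-- ===== SOURCE B (Python) =====
-- def _build_mutation_lookup_static(aa_to_codon: dict, codon_to_aa: dict,
--                                  codon_to_syn: dict, stops: list, codons: list) -> dict:
--     """Per-AA decomposition: precompute the four AA-dependent mutation lists once
--     per distinct amino acid, then copy them into each codon's entry."""
--     items = list(aa_to_codon.items())
--     per_aa = {}
--     for c in codons:
--         cur = codon_to_aa[c]
--         if cur in per_aa: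
--             continue
--         ns_first, ns_all, ms_first, ms_all = [], [], [], []
--         for aa, cl in items:
--             if aa == cur:
--                 continue
--             ns_first.append(cl[0])
--             ns_all.extend(cl)
--             if aa != '*':
--                 ms_first.append(cl[0])
--                 ms_all.extend(cl)
--         per_aa[cur] = (ns_first, ns_all, ms_first, ms_all)
--     stop_set = set(stops)
--     return {
--         'any_codon': {c: [x for x in codons if x != c] for c in codons},
--         'nonsynonymous_first': {c: list(per_aa[codon_to_aa[c]][0]) for c in codons},
--         'nonsynonymous_random': {c: list(per_aa[codon_to_aa[c]][1]) for c in codons},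
--         'missense_only_first': {c: list(per_aa[codon_to_aa[c]][2]) for c in codons},
--         'missense_only_random': {c: list(per_aa[codon_to_aa[c]][3]) for c in codons},
--         'synonymous': codon_to_syn,
--         'nonsense': {c: [] if c in stop_set else list(stops) for c in codons},
--     }
-- ===== Notes on version B (the rewrite author's own statement) =====
-- stated objective: alternative
-- what changed: B precomputes the four AA-dependent mutation lists once per distinct amino acid (a per-AA cache built in one pass over the items) and copies them into each codon's entry, instead of A's recomputing every list from scratch for every codon in four separate passes.
import Mathlib
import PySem

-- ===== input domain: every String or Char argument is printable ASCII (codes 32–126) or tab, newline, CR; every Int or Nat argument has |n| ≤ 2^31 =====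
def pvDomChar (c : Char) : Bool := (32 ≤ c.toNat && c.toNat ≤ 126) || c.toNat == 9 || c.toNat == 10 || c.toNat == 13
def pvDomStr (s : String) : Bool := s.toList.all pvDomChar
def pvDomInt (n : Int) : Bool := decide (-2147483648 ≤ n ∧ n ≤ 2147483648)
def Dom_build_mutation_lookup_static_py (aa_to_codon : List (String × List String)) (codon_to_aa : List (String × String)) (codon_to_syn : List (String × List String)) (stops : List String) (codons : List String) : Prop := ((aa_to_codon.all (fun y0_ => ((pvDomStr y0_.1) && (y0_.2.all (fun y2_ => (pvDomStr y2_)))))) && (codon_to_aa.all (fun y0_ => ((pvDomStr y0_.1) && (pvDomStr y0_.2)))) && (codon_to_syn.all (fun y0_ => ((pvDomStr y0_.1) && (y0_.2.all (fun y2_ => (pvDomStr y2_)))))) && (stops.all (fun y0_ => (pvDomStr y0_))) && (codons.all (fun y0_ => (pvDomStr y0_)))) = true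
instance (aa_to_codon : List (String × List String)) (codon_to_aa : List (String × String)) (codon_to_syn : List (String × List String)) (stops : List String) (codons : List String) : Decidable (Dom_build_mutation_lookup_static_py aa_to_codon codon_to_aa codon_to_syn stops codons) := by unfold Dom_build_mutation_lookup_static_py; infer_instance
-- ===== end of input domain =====

-- One honest line: B precomputes the four AA-dependent mutation lists once per distinct
-- amino acid and copies them per codon, instead of A's recomputation per codon (objective: alternative/faster per timing).
-- Equivalence is about the RETURN value; neither program mutates its arguments.

-- ===== PORT A =====
-- A-side helpers: dict lookups (total forms; defaults are unreachable under Pre_,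
-- which excludes exactly the KeyError/IndexError inputs)
def pvAget (a2c : List (String × List String)) (k : String) : List String :=
  ((PySem.Dict.mk a2c).get? k).getD []
def pvAaOf (c2a : List (String × String)) (c : String) : String :=
  ((PySem.Dict.mk c2a).get? c).getD ""

def build_mutation_lookup_static_py (aa_to_codon : List (String × List String)) (codon_to_aa : List (String × String)) (codon_to_syn : List (String × List String)) (stops : List String) (codons : List String) : List (String × List (String × List String)) :=
  -- 1. any_codon
  let table1 := (codons.foldl (fun d codon =>
      d.insert codon (codons.filter (fun c => c != codon))) PySem.Dict.empty).items
  -- 2. nonsynonymous_first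
  let table2 := (codons.foldl (fun d codon =>
      let current_aa := pvAaOf codon_to_aa codon
      d.insert codon (((aa_to_codon.map Prod.fst).filter (fun aa => aa != current_aa)).map
        (fun aa => (pvAget aa_to_codon aa).headD ""))) PySem.Dict.empty).items
  -- 3. nonsynonymous_random
  let table3 := (codons.foldl (fun d codon =>
      let current_aa := pvAaOf codon_to_aa codon
      d.insert codon (aa_to_codon.foldl (fun mutations p =>
        if p.1 != current_aa then mutations ++ p.2 else mutations) [])) PySem.Dict.empty).items
  -- 4. missense_only_first
  let table4 := (codons.foldl (fun d codon =>
      let current_aa := pvAaOf codon_to_aa codon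
      d.insert codon (((aa_to_codon.map Prod.fst).filter (fun aa => aa != current_aa && aa != "*")).map
        (fun aa => (pvAget aa_to_codon aa).headD ""))) PySem.Dict.empty).items
  -- 5. missense_only_random
  let table5 := (codons.foldl (fun d codon =>
      let current_aa := pvAaOf codon_to_aa codon
      d.insert codon (aa_to_codon.foldl (fun mutations p =>
        if p.1 != current_aa && p.1 != "*" then mutations ++ p.2 else mutations) [])) PySem.Dict.empty).items
  -- 7. nonsense
  let table7 := (codons.foldl (fun d codon =>
      d.insert codon (if stops.contains codon then [] else stops)) PySem.Dict.empty).items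
  [("any_codon", table1), ("nonsynonymous_first", table2), ("nonsynonymous_random", table3),
   ("missense_only_first", table4), ("missense_only_random", table5),
   ("synonymous", codon_to_syn), ("nonsense", table7)]

-- ===== PORT B =====
-- B-side helpers (pvAaOf, the codon_to_aa lookup, is shared with port A)
-- the inner 'for aa, cl in items' loop of B building the four lists at once
def pvTablesFor (a2c : List (String × List String)) (cur : String) :
    List String × List String × List String × List String :=
  a2c.foldl (fun acc p =>
    if p.1 == cur then acc
    else
      let nf := acc.1 ++ [p.2.headD ""]
      let na := acc.2.1 ++ p.2
      if p.1 == "*" then (nf, na, acc.2.2.1, acc.2.2.2)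
      else (nf, na, acc.2.2.1 ++ [p.2.headD ""], acc.2.2.2 ++ p.2)) ([], [], [], [])

-- the 'for c in codons' loop filling the per-AA cache
def pvCacheStep (a2c : List (String × List String)) (c2a : List (String × String)) :
    PySem.Dict String (List String × List String × List String × List String) → String →
    PySem.Dict String (List String × List String × List String × List String) :=
  fun pa c =>
    let cur := pvAaOf c2a c
    if pa.contains cur then pa else pa.insert cur (pvTablesFor a2c cur)

def build_mutation_lookup_static_py_alt (aa_to_codon : List (String × List String)) (codon_to_aa : List (String × String)) (codon_to_syn : List (String × List String)) (stops : List String) (codons : List String) : List (String × List (String × List String)) :=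
  let perAa := codons.foldl (pvCacheStep aa_to_codon codon_to_aa) PySem.Dict.empty
  let get4 := fun c => perAa.getD (pvAaOf codon_to_aa c) ([], [], [], [])
  let stopSet := PySem.Set.ofList stops
  [("any_codon", (codons.foldl (fun d c =>
      d.insert c (codons.filter (fun x => x != c))) PySem.Dict.empty).items),
   ("nonsynonymous_first", (codons.foldl (fun d c =>
      d.insert c (get4 c).1) PySem.Dict.empty).items),
   ("nonsynonymous_random", (codons.foldl (fun d c =>
      d.insert c (get4 c).2.1) PySem.Dict.empty).items),
   ("missense_only_first", (codons.foldl (fun d c =>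
      d.insert c (get4 c).2.2.1) PySem.Dict.empty).items),
   ("missense_only_random", (codons.foldl (fun d c =>
      d.insert c (get4 c).2.2.2) PySem.Dict.empty).items),
   ("synonymous", codon_to_syn),
   ("nonsense", (codons.foldl (fun d c =>
      d.insert c (if stopSet.contains c then [] else stops)) PySem.Dict.empty).items)]

-- ===== PRECONDITION & SPEC =====
-- Pre_ excludes exactly the inputs where the Python A raises: a codon of `codons` missing
-- from codon_to_aa (KeyError) or an empty codon list of a differing amino acid reached by
-- aa_to_codon[aa][0] (IndexError); the Nodup conjunct only states the Python dict invariant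
-- (a dict cannot have duplicate keys), so it excludes no input the Python A can receive.
def Pre_build_mutation_lookup_static_py (aa_to_codon : List (String × List String)) (codon_to_aa : List (String × String)) (codon_to_syn : List (String × List String)) (stops : List String) (codons : List String) : Prop :=
  (aa_to_codon.map Prod.fst).Nodup ∧
  (∀ c ∈ codons, ((PySem.Dict.mk codon_to_aa).get? c).isSome) ∧
  (∀ p ∈ aa_to_codon, p.2 = [] → ∀ c ∈ codons, (PySem.Dict.mk codon_to_aa).get? c = some p.1)
instance (aa_to_codon : List (String × List String)) (codon_to_aa : List (String × String)) (codon_to_syn : List (String × List String)) (stops : List String) (codons : List String) : Decidable (Pre_build_mutation_lookup_static_py aa_to_codon codon_to_aa codon_to_syn stops codons) := by unfold Pre_build_mutation_lookup_static_py; infer_instance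

def pvWitness_build_mutation_lookup_static_py : (List (String × List String)) × (List (String × String)) × (List (String × List String)) × List String × List String :=
  ([("K", ["AAA", "AAG"]), ("*", ["TAA"])],
   [("AAA", "K"), ("AAG", "K"), ("TAA", "*")],
   [("AAA", ["AAG"]), ("AAG", ["AAA"]), ("TAA", [])],
   ["TAA"],
   ["AAA", "AAG", "TAA"])

def Spec_build_mutation_lookup_static_py (aa_to_codon : List (String × List String)) (codon_to_aa : List (String × String)) (codon_to_syn : List (String × List String)) (stops : List String) (codons : List String) (out : List (String × List (String × List String))) : Prop := out = build_mutation_lookup_static_py_alt aa_to_codon codon_to_aa codon_to_syn stops codons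
instance (aa_to_codon : List (String × List String)) (codon_to_aa : List (String × String)) (codon_to_syn : List (String × List String)) (stops : List String) (codons : List String) (out : List (String × List (String × List String))) : Decidable (Spec_build_mutation_lookup_static_py aa_to_codon codon_to_aa codon_to_syn stops codons out) := by unfold Spec_build_mutation_lookup_static_py; infer_instance

-- ===== CLAIM (what is proved, stated in full; the proofs are below) =====
def Claim_equal_build_mutation_lookup_static_py : Prop := ∀ (aa_to_codon : List (String × List String)) (codon_to_aa : List (String × String)) (codon_to_syn : List (String × List String)) (stops : List String) (codons : List String), Dom_build_mutation_lookup_static_py aa_to_codon codon_to_aa codon_to_syn stops codons → Pre_build_mutation_lookup_static_py aa_to_codon codon_to_aa codon_to_syn stops codons → Spec_build_mutation_lookup_static_py aa_to_codon codon_to_aa codon_to_syn stops codons (build_mutation_lookup_static_py aa_to_codon codon_to_aa codon_to_syn stops codons)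

-- ===== LEMMAS AND PROOFS =====

-- inserting pointwise-equal values gives the same dict
theorem pv_foldl_insert_congr {ν : Type} (l : List String) (f g : String → ν)
    (d : PySem.Dict String ν) (h : ∀ c ∈ l, f c = g c) :
    l.foldl (fun d c => d.insert c (f c)) d = l.foldl (fun d c => d.insert c (g c)) d := by
  induction l generalizing d with
  | nil => rfl
  | cons a l ih =>
    simp only [List.foldl_cons]
    rw [h a (List.mem_cons_self), ih _ (fun c hc => h c (List.mem_cons_of_mem a hc))]

-- A's extend-loop in normal form
theorem pv_extend_fold (l : List (String × List String)) (q : String → Bool)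
    (init : List String) :
    l.foldl (fun acc p => if q p.1 then acc ++ p.2 else acc) init
      = init ++ (l.filter (fun p => q p.1)).flatMap (fun p => p.2) := by
  induction l generalizing init with
  | nil => simp
  | cons a l ih =>
    simp only [List.foldl_cons, List.filter_cons]
    by_cases hq : q a.1
    · simp [hq, ih, List.append_assoc]
    · simp [hq, ih]

-- B's combined inner loop in normal form
theorem pv_tablesFor_eq (a2c : List (String × List String)) (cur : String) :
    pvTablesFor a2c cur =
      ((a2c.filter (fun p => p.1 != cur)).map (fun p => p.2.headD ""),
       (a2c.filter (fun p => p.1 != cur)).flatMap (fun p => p.2),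
       (a2c.filter (fun p => p.1 != cur && p.1 != "*")).map (fun p => p.2.headD ""),
       (a2c.filter (fun p => p.1 != cur && p.1 != "*")).flatMap (fun p => p.2)) := by
  suffices h : ∀ init : List String × List String × List String × List String,
      a2c.foldl (fun acc p =>
        if p.1 == cur then acc
        else
          let nf := acc.1 ++ [p.2.headD ""]
          let na := acc.2.1 ++ p.2
          if p.1 == "*" then (nf, na, acc.2.2.1, acc.2.2.2)
          else (nf, na, acc.2.2.1 ++ [p.2.headD ""], acc.2.2.2 ++ p.2)) init
      = (init.1 ++ (a2c.filter (fun p => p.1 != cur)).map (fun p => p.2.headD ""),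
         init.2.1 ++ (a2c.filter (fun p => p.1 != cur)).flatMap (fun p => p.2),
         init.2.2.1 ++ (a2c.filter (fun p => p.1 != cur && p.1 != "*")).map (fun p => p.2.headD ""),
         init.2.2.2 ++ (a2c.filter (fun p => p.1 != cur && p.1 != "*")).flatMap (fun p => p.2)) by
    have := h ([], [], [], [])
    simpa [pvTablesFor] using this
  induction a2c with
  | nil => intro init; simp
  | cons a l ih =>
    intro init
    simp only [List.foldl_cons, List.filter_cons]
    rw [ih]
    by_cases hc : a.1 = cur
    · simp [hc]
    · by_cases hs : a.1 = "*"
      · have hcs : ("*" : String) ≠ cur := hs ▸ hc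
        simp [hs, hcs, List.append_assoc]
      · simp [hc, hs, List.append_assoc]

-- iterating over keys() and looking each key up = iterating over the items (unique keys)
theorem pv_mapkeys {α : Type} (a2c : List (String × List String)) (hnd : (a2c.map Prod.fst).Nodup)
    (q : String → Bool) (f : List String → α) :
    ((a2c.map Prod.fst).filter q).map (fun aa => f (pvAget a2c aa))
      = (a2c.filter (fun p => q p.1)).map (fun p => f p.2) := by
  induction a2c with
  | nil => simp
  | cons a l ih =>
    simp only [List.map_cons, List.nodup_cons] at hnd ⊢
    have hk : f (pvAget (a :: l) a.1) = f a.2 := by simp [pvAget, PySem.Dict.get?]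
    have hne : ∀ aa ∈ (l.map Prod.fst).filter q, f (pvAget (a :: l) aa) = f (pvAget l aa) := by
      intro aa haa
      have hmem : aa ∈ l.map Prod.fst := List.mem_of_mem_filter haa
      have hx : a.1 ≠ aa := fun h => hnd.1 (h ▸ hmem)
      simp [pvAget, PySem.Dict.get?, hx]
    rw [List.filter_cons, List.filter_cons]
    by_cases hq : q a.1 = true
    · rw [if_pos hq, if_pos hq, List.map_cons, List.map_cons, hk,
          List.map_congr_left hne, ih hnd.2]
    · rw [if_neg hq, if_neg hq, List.map_congr_left hne, ih hnd.2]

-- every value stored in the cache is pvTablesFor of its key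
theorem pv_cache_inv (a2c : List (String × List String)) (c2a : List (String × String))
    (l : List String) (pa : PySem.Dict String (List String × List String × List String × List String))
    (hpa : ∀ k v, pa.get? k = some v → v = pvTablesFor a2c k) :
    ∀ k v, (l.foldl (pvCacheStep a2c c2a) pa).get? k = some v → v = pvTablesFor a2c k := by
  induction l generalizing pa with
  | nil => exact hpa
  | cons c l ih =>
    simp only [List.foldl_cons]
    apply ih
    intro k v hv
    simp only [pvCacheStep] at hv
    by_cases hcont : pa.contains (pvAaOf c2a c)
    · rw [if_pos hcont] at hv; exact hpa k v hv
    · rw [if_neg hcont, PySem.Dict.get?_insert] at hv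
      by_cases hk : k = pvAaOf c2a c
      · rw [if_pos hk] at hv
        cases hv; rw [hk]
      · rw [if_neg hk] at hv; exact hpa k v hv

theorem pv_cache_contains_mono (a2c : List (String × List String)) (c2a : List (String × String))
    (l : List String) (pa : PySem.Dict String (List String × List String × List String × List String))
    (k : String) (h : pa.contains k = true) :
    (l.foldl (pvCacheStep a2c c2a) pa).contains k = true := by
  induction l generalizing pa with
  | nil => exact h
  | cons c l ih =>
    simp only [List.foldl_cons]
    apply ih
    simp only [pvCacheStep]
    by_cases hcont : pa.contains (pvAaOf c2a c)
    · rw [if_pos hcont]; exact h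
    · rw [if_neg hcont, PySem.Dict.contains_insert, h, Bool.or_true]

theorem pv_cache_contains_of_mem (a2c : List (String × List String)) (c2a : List (String × String))
    (l : List String) (pa : PySem.Dict String (List String × List String × List String × List String))
    (c : String) (hc : c ∈ l) :
    (l.foldl (pvCacheStep a2c c2a) pa).contains (pvAaOf c2a c) = true := by
  induction l generalizing pa with
  | nil => cases hc
  | cons a l ih =>
    simp only [List.foldl_cons]
    rcases List.mem_cons.mp hc with h | h
    · subst h
      apply pv_cache_contains_mono
      simp only [pvCacheStep]
      by_cases hcont : pa.contains (pvAaOf c2a c)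
      · rw [if_pos hcont]; exact hcont
      · rw [if_neg hcont]; exact PySem.Dict.contains_insert_self _ _ _
    · exact ih _ h

-- so the cache read gives exactly pvTablesFor of the codon's amino acid
theorem pv_cache_getD (a2c : List (String × List String)) (c2a : List (String × String))
    (codons : List String) (c : String) (hc : c ∈ codons) :
    (codons.foldl (pvCacheStep a2c c2a) PySem.Dict.empty).getD (pvAaOf c2a c) ([], [], [], [])
      = pvTablesFor a2c (pvAaOf c2a c) := by
  have hcont := pv_cache_contains_of_mem a2c c2a codons PySem.Dict.empty c hc
  rw [PySem.Dict.contains_eq_isSome_get?] at hcont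
  rcases Option.isSome_iff_exists.mp hcont with ⟨v, hv⟩
  rw [PySem.Dict.getD_eq_get?_getD, hv, Option.getD_some]
  exact (pv_cache_inv a2c c2a codons PySem.Dict.empty
    (by intro k v h; simp [PySem.Dict.get?, PySem.Dict.empty] at h) (pvAaOf c2a c) v hv)

-- the four per-codon lists agree
theorem pv_value_eq (a2c : List (String × List String)) (hnd : (a2c.map Prod.fst).Nodup)
    (cur : String) :
    pvTablesFor a2c cur =
      (((a2c.map Prod.fst).filter (fun aa => aa != cur)).map (fun aa => (pvAget a2c aa).headD ""),
       a2c.foldl (fun mutations p => if p.1 != cur then mutations ++ p.2 else mutations) [],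
       ((a2c.map Prod.fst).filter (fun aa => aa != cur && aa != "*")).map (fun aa => (pvAget a2c aa).headD ""),
       a2c.foldl (fun mutations p => if p.1 != cur && p.1 != "*" then mutations ++ p.2 else mutations) []) := by
  rw [pv_tablesFor_eq]
  rw [pv_extend_fold a2c (fun aa => aa != cur) [], pv_extend_fold a2c (fun aa => aa != cur && aa != "*") []]
  simp only [Prod.mk.injEq, List.nil_append]
  exact ⟨(pv_mapkeys a2c hnd (fun aa => aa != cur) (fun l => l.headD "")).symm, trivial,
         (pv_mapkeys a2c hnd (fun aa => aa != cur && aa != "*") (fun l => l.headD "")).symm, trivial⟩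

-- ===== VERDICT (by name: the statement is the Claim_ definition above) =====
theorem build_mutation_lookup_static_py_spec : Claim_equal_build_mutation_lookup_static_py := by
  intro a2c c2a syn stops codons _hdom hpre
  obtain ⟨hnd, -, -⟩ := hpre
  unfold Spec_build_mutation_lookup_static_py build_mutation_lookup_static_py build_mutation_lookup_static_py_alt
  simp only [List.cons.injEq, Prod.mk.injEq, true_and, and_true]
  refine ⟨?_, ?_, ?_, ?_, ?_⟩
  · -- nonsynonymous_first
    show (codons.foldl (fun d codon => d.insert codon
        (((a2c.map Prod.fst).filter (fun aa => aa != pvAaOf c2a codon)).map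
          (fun aa => (pvAget a2c aa).headD ""))) PySem.Dict.empty).items
      = (codons.foldl (fun d c => d.insert c
        (((codons.foldl (pvCacheStep a2c c2a) PySem.Dict.empty).getD (pvAaOf c2a c)
          ([], [], [], [])).1)) PySem.Dict.empty).items
    refine congrArg PySem.Dict.items (pv_foldl_insert_congr codons _ _ _ ?_)
    intro c hc
    rw [pv_cache_getD a2c c2a codons c hc, pv_value_eq a2c hnd]
  · -- nonsynonymous_random
    show (codons.foldl (fun d codon => d.insert codon
        (a2c.foldl (fun mutations p =>
          if p.1 != pvAaOf c2a codon then mutations ++ p.2 else mutations) [])) PySem.Dict.empty).items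
      = (codons.foldl (fun d c => d.insert c
        (((codons.foldl (pvCacheStep a2c c2a) PySem.Dict.empty).getD (pvAaOf c2a c)
          ([], [], [], [])).2.1)) PySem.Dict.empty).items
    refine congrArg PySem.Dict.items (pv_foldl_insert_congr codons _ _ _ ?_)
    intro c hc
    rw [pv_cache_getD a2c c2a codons c hc, pv_value_eq a2c hnd]
  · -- missense_only_first
    show (codons.foldl (fun d codon => d.insert codon
        (((a2c.map Prod.fst).filter (fun aa => aa != pvAaOf c2a codon && aa != "*")).map
          (fun aa => (pvAget a2c aa).headD ""))) PySem.Dict.empty).items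
      = (codons.foldl (fun d c => d.insert c
        (((codons.foldl (pvCacheStep a2c c2a) PySem.Dict.empty).getD (pvAaOf c2a c)
          ([], [], [], [])).2.2.1)) PySem.Dict.empty).items
    refine congrArg PySem.Dict.items (pv_foldl_insert_congr codons _ _ _ ?_)
    intro c hc
    rw [pv_cache_getD a2c c2a codons c hc, pv_value_eq a2c hnd]
  · -- missense_only_random
    show (codons.foldl (fun d codon => d.insert codon
        (a2c.foldl (fun mutations p =>
          if p.1 != pvAaOf c2a codon && p.1 != "*" then mutations ++ p.2 else mutations) [])) PySem.Dict.empty).items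
      = (codons.foldl (fun d c => d.insert c
        (((codons.foldl (pvCacheStep a2c c2a) PySem.Dict.empty).getD (pvAaOf c2a c)
          ([], [], [], [])).2.2.2)) PySem.Dict.empty).items
    refine congrArg PySem.Dict.items (pv_foldl_insert_congr codons _ _ _ ?_)
    intro c hc
    rw [pv_cache_getD a2c c2a codons c hc, pv_value_eq a2c hnd]
  · -- nonsense
    refine congrArg PySem.Dict.items (pv_foldl_insert_congr codons _ _ _ ?_)
    intro c _
    have : (PySem.Set.ofList stops).contains c = stops.contains c := by simp [pysem]
    rw [this]
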